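-- pv_equiv track=rewrite | github.com/weblab-class/casey2e-nlevando | backend/src/FilteringAndPrioritizing.py | pick_best_ride
-- ===== SOURCE A (Python) =====
-- def pick_best_ride(rides_with_waits, user_prefs):
--     """
--     Given a list of (ride_name, wait_time) and a dict of user preferences,
--     find the ride that has:
--       - The highest preference rating
--       - Among those, the shortest wait time
--     Returns a tuple: (best_ride_name, best_wait_time, best_pref)
--     """
--
--     # Sort by preference DESC, then wait_time ASC
--     # i.e., we want to pick the top preference ride that also has the shortest line
--     # If user_prefs doesn't have a ride rated, treat it as 0 or skip.
--
--     # 1) Build a combined structure for sorting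
--     combined = []
--     for ride_name, wait_time in rides_with_waits:
--         pref = user_prefs.get(ride_name, 0)
--         combined.append((ride_name, wait_time, pref))
--
--     # 2) Sort: first by preference (descending), then by wait_time (ascending)
--     # Combined sort key: (-pref, wait_time)
--     combined.sort(key=lambda x: (-x[2], x[1]))
--
--     # 3) The best ride is now the first in sorted list (if any)
--     if len(combined) == 0:
--         return None, None, None
--
--     best_ride_name, best_wait, best_pref = combined[0]
--     return best_ride_name, best_wait, best_pref
-- ===== SOURCE B (Python) =====
-- def pick_best_ride(rides_with_waits, user_prefs):
--     if not rides_with_waits: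
--         return None, None, None
--     best_pref = max(user_prefs.get(name, 0) for name, _ in rides_with_waits)
--     best_name = None
--     best_wait = None
--     for name, wait in rides_with_waits:
--         if user_prefs.get(name, 0) == best_pref and (best_wait is None or wait < best_wait):
--             best_name, best_wait = name, wait
--     return best_name, best_wait, best_pref
-- ===== Notes on version B (the rewrite author's own statement) =====
-- stated objective: alternative
-- what changed: Replaced build-triples + stable sort by (-pref, wait) + take first element with an empty guard, a max-preference pass, and a filtered linear scan tracking the minimum wait with strict '<' so the first ride wins ties.
import Mathlib
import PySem

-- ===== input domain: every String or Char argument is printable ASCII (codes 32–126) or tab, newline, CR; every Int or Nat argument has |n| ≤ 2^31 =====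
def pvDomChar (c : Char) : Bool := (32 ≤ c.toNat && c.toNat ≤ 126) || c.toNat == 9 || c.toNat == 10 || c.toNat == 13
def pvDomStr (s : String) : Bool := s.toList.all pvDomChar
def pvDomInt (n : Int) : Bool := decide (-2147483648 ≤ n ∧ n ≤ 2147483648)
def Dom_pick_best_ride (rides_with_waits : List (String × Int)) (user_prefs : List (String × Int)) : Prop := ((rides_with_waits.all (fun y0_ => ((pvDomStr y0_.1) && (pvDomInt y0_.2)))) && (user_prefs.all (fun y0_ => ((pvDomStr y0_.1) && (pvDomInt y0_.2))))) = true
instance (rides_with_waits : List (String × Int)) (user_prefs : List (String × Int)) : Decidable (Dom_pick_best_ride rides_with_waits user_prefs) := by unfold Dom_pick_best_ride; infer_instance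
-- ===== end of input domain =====

-- B replaces A's sort-by-(-pref, wait)-and-take-first by a max-preference pass plus a
-- filtered minimum-wait scan (strict '<', first ride wins ties): an alternative O(n) selection.

-- ===== PORT A =====
def pick_best_ride (rides_with_waits : List (String × Int)) (user_prefs : List (String × Int)) : Option String × Option Int × Option Int :=
  -- combined = []; for ride_name, wait_time in rides_with_waits: combined.append((name, wait, prefs.get(name,0)))
  let combined : List (String × Int × Int) :=
    rides_with_waits.foldl (fun acc p => acc ++ [(p.1, p.2, PySem.Dict.getD (PySem.Dict.mk user_prefs) p.1 0)]) []
  -- combined.sort(key=lambda x: (-x[2], x[1]))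
  let combined := PySem.List.sorted2 combined (fun x => -x.2.2) (fun x => x.2.1)
  -- if len(combined) == 0: return None, None, None ; else unpack combined[0]
  match combined with
  | [] => (none, none, none)
  | (n, w, p) :: _ => (some n, some w, some p)

-- ===== PORT B =====
def pick_best_ride_alt (rides_with_waits : List (String × Int)) (user_prefs : List (String × Int)) : Option String × Option Int × Option Int :=
  match rides_with_waits with
  | [] => (none, none, none)
  | r :: rs =>
    -- best_pref = max(user_prefs.get(name, 0) for name, _ in rides_with_waits)
    let best_pref : Int :=
      List.foldl max (PySem.Dict.getD (PySem.Dict.mk user_prefs) r.1 0)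
        (rs.map (fun q => PySem.Dict.getD (PySem.Dict.mk user_prefs) q.1 0))
    -- second pass: first ride with pref == best_pref and strictly smaller wait wins
    let sel : Option String × Option Int :=
      (r :: rs).foldl
        (fun acc q =>
          if (PySem.Dict.getD (PySem.Dict.mk user_prefs) q.1 0 == best_pref
              && acc.2.all (fun w => decide (q.2 < w))) then (some q.1, some q.2) else acc)
        (none, none)
    (sel.1, sel.2, some best_pref)

-- ===== PRECONDITION & SPEC =====
def Spec_pick_best_ride (rides_with_waits : List (String × Int)) (user_prefs : List (String × Int)) (out : Option String × Option Int × Option Int) : Prop := out = pick_best_ride_alt rides_with_waits user_prefs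
instance (rides_with_waits : List (String × Int)) (user_prefs : List (String × Int)) (out : Option String × Option Int × Option Int) : Decidable (Spec_pick_best_ride rides_with_waits user_prefs out) := by unfold Spec_pick_best_ride; infer_instance

-- ===== CLAIM (what is proved, stated in full; the proofs are below) =====
def Claim_equal_pick_best_ride : Prop := ∀ (rides_with_waits : List (String × Int)) (user_prefs : List (String × Int)), Dom_pick_best_ride rides_with_waits user_prefs → Spec_pick_best_ride rides_with_waits user_prefs (pick_best_ride rides_with_waits user_prefs)

-- ===== LEMMAS AND PROOFS =====

-- generic "leftmost strict minimum" machinery for a Bool comparator lt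
def pvSelR {α : Type} (lt : α → α → Bool) : List α → Option α
  | [] => none
  | x :: xs =>
    match pvSelR lt xs with
    | none => some x
    | some s => some (if lt s x then s else x)

theorem pvSelR_cons {α : Type} (lt : α → α → Bool) (x : α) (l : List α) :
    pvSelR lt (x :: l) =
      match pvSelR lt l with
      | none => some x
      | some s => some (if lt s x then s else x) := rfl

def pvStep {α : Type} (lt : α → α → Bool) (c : Option α) (x : α) : Option α :=
  some (match c with
        | none => x
        | some c => if lt x c then x else c)

def pvF {α : Type} (lt : α → α → Bool) (a b : α) : α := if lt b a then b else a

-- head of an insertBy-insertion (Python's stable sort) is the running strict minimum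
theorem pvHead_foldl_insertBy {α : Type} (lt : α → α → Bool) :
    ∀ (xs : List α) (acc : List α),
      (List.foldl (fun acc x => PySem.List.insertBy lt x acc) acc xs).head? =
        List.foldl (pvStep lt) acc.head? xs := by
  intro xs
  induction xs with
  | nil => intro acc; rfl
  | cons x xs ih =>
    intro acc
    simp only [List.foldl_cons]
    rw [ih]
    congr 1
    cases acc with
    | nil => rfl
    | cons h t =>
      simp only [PySem.List.insertBy, pvStep]
      by_cases h' : lt x h = true <;> simp [h']

theorem pvFoldl_step_eq_selR {α : Type} (lt : α → α → Bool)
    (hassoc : ∀ a b c, pvF lt (pvF lt a b) c = pvF lt a (pvF lt b c)) :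
    ∀ (xs : List α) (c : Option α),
      List.foldl (pvStep lt) c xs =
        match c, pvSelR lt xs with
        | c, none => c
        | none, some s => some s
        | some c, some s => some (pvF lt c s) := by
  intro xs
  induction xs with
  | nil => intro c; cases c <;> rfl
  | cons x xs ih =>
    intro c
    simp only [List.foldl_cons]
    rw [ih]
    cases c with
    | none =>
      simp only [pvStep]
      cases hs : pvSelR lt xs with
      | none => simp [pvSelR, hs, pvF]
      | some s => simp [pvSelR, hs, pvF]
    | some c =>
      simp only [pvStep]
      cases hs : pvSelR lt xs with
      | none => simp [pvSelR, hs, pvF]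
      | some s =>
        simp only [pvSelR, hs]
        show some (pvF lt (pvF lt c x) s) = some (pvF lt c (pvF lt x s))
        rw [hassoc]

-- the lexicographic comparator A's sort uses, on (name, wait, pref) triples
def pvLtA (a b : String × Int × Int) : Bool :=
  decide ((fun x : String × Int × Int => -x.2.2) a < (fun x : String × Int × Int => -x.2.2) b) ||
    (!decide ((fun x : String × Int × Int => -x.2.2) b < (fun x : String × Int × Int => -x.2.2) a) &&
      decide ((fun x : String × Int × Int => x.2.1) a < (fun x : String × Int × Int => x.2.1) b))

theorem pvLtA_eq (a b : String × Int × Int) :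
    pvLtA a b = decide (b.2.2 < a.2.2 ∨ (b.2.2 ≤ a.2.2 ∧ a.2.1 < b.2.1)) := by
  by_cases h1 : b.2.2 < a.2.2 <;> by_cases h2 : a.2.2 < b.2.2 <;> by_cases h3 : a.2.1 < b.2.1 <;>
    simp [pvLtA, h1, h2, h3] <;> omega

theorem pvLtA_assoc : ∀ a b c, pvF pvLtA (pvF pvLtA a b) c = pvF pvLtA a (pvF pvLtA b c) := by
  intro a b c
  simp only [pvF, pvLtA_eq, decide_eq_true_eq]
  split_ifs <;> first | rfl | omega

-- the wait comparator B's second pass uses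
def pvLtW (a b : String × Int) : Bool := decide (a.2 < b.2)

theorem pvLtW_assoc : ∀ a b c, pvF pvLtW (pvF pvLtW a b) c = pvF pvLtW a (pvF pvLtW b c) := by
  intro a b c
  simp only [pvF, pvLtW, decide_eq_true_eq]
  split_ifs <;> first | rfl | omega

-- combined-building foldl is a map
theorem pvCombined_eq_map (prefs : List (String × Int)) :
    ∀ (xs : List (String × Int)) (acc : List (String × Int × Int)),
      xs.foldl (fun acc p => acc ++ [(p.1, p.2, PySem.Dict.getD (PySem.Dict.mk prefs) p.1 0)]) acc =
        acc ++ xs.map (fun p => (p.1, p.2, PySem.Dict.getD (PySem.Dict.mk prefs) p.1 0)) := by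
  intro xs
  induction xs with
  | nil => intro acc; simp
  | cons x xs ih => intro acc; simp [ih]

-- B's guarded fold equals the pure min-wait fold on the filtered list
theorem pvBfold_eq_filter (prefs : List (String × Int)) (bp : Int) :
    ∀ (xs : List (String × Int)) (c : Option (String × Int)),
      xs.foldl
        (fun (acc : Option String × Option Int) q =>
          if (PySem.Dict.getD (PySem.Dict.mk prefs) q.1 0 == bp
              && acc.2.all (fun w => decide (q.2 < w))) then (some q.1, some q.2) else acc)
        (c.map Prod.fst, c.map Prod.snd) =
      (let o := List.foldl (pvStep pvLtW) c (xs.filter (fun q => PySem.Dict.getD (PySem.Dict.mk prefs) q.1 0 == bp))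
       (o.map Prod.fst, o.map Prod.snd)) := by
  intro xs
  induction xs with
  | nil => intro c; rfl
  | cons x xs ih =>
    intro c
    simp only [List.foldl_cons, List.filter_cons]
    by_cases hp : (PySem.Dict.getD (PySem.Dict.mk prefs) x.1 0 == bp) = true
    · simp only [hp, if_pos, Bool.true_and]
      cases c with
      | none =>
        simp only [Option.map_none, Option.all_none, Bool.and_true]
        have := ih (some x)
        simpa [pvStep, List.foldl_cons] using this
      | some c =>
        simp only [Option.map_some, Option.all_some]
        by_cases hd : decide (x.2 < c.2) = true
        · simp only [hd, Bool.and_true, List.foldl_cons]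
          have := ih (some x)
          simp only [pvStep, pvLtW, hd] at this ⊢
          simpa using this
        · simp only [hd, Bool.and_false, List.foldl_cons]
          have := ih (some c)
          simp only [pvStep, pvLtW, hd] at this ⊢
          simpa using this
    · simp only [hp, Bool.false_and, if_neg, Bool.false_eq_true, not_false_iff]
      exact ih c

-- foldl max commutes out
theorem pvFoldl_max_out : ∀ (l : List Int) (a b : Int),
    List.foldl max (max a b) l = max a (List.foldl max b l) := by
  intro l
  induction l with
  | nil => intro a b; rfl
  | cons x l ih =>
    intro a b
    simp only [List.foldl_cons]
    rw [max_assoc, ih]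

-- foldl max is an upper bound
theorem pvFoldl_max_isMax : ∀ (l : List Int) (a : Int),
    a ≤ List.foldl max a l ∧ ∀ y ∈ l, y ≤ List.foldl max a l := by
  intro l
  induction l with
  | nil => intro a; simp
  | cons x l ih =>
    intro a
    simp only [List.foldl_cons]
    obtain ⟨h1, h2⟩ := ih (max a x)
    refine ⟨le_trans (le_max_left a x) h1, ?_⟩
    intro y hy
    rcases List.mem_cons.mp hy with rfl | hy
    · exact le_trans (le_max_right a y) h1
    · exact h2 y hy

-- abbreviations for the main induction
def pvPref (prefs : List (String × Int)) (q : String × Int) : Int := PySem.Dict.getD (PySem.Dict.mk prefs) q.1 0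
def pvTri (prefs : List (String × Int)) (q : String × Int) : String × Int × Int := (q.1, q.2, pvPref prefs q)
def pvMaxP (prefs : List (String × Int)) (r : String × Int) (rs : List (String × Int)) : Int :=
  List.foldl max (pvPref prefs r) (rs.map (pvPref prefs))

theorem pvMaxP_cons (prefs : List (String × Int)) (x y : String × Int) (ys : List (String × Int)) :
    pvMaxP prefs x (y :: ys) = max (pvPref prefs x) (pvMaxP prefs y ys) := by
  simp only [pvMaxP, List.map_cons, List.foldl_cons]
  rw [show max (pvPref prefs x) (pvPref prefs y) = max (pvPref prefs x) (pvPref prefs y) from rfl,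
      pvFoldl_max_out]

theorem pvMaxP_isMax (prefs : List (String × Int)) (x : String × Int) (xs : List (String × Int)) :
    ∀ y ∈ x :: xs, pvPref prefs y ≤ pvMaxP prefs x xs := by
  intro y hy
  obtain ⟨h1, h2⟩ := pvFoldl_max_isMax (xs.map (pvPref prefs)) (pvPref prefs x)
  rcases List.mem_cons.mp hy with rfl | hy
  · exact h1
  · exact h2 _ (List.mem_map_of_mem hy)

-- main characterization: selA of the triple list names the max pref and the
-- first min-wait among the max-pref rides
theorem pvMain (prefs : List (String × Int)) :
    ∀ (xs : List (String × Int)) (x : String × Int),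
      ∃ n w, pvSelR pvLtA ((x :: xs).map (pvTri prefs)) = some (n, w, pvMaxP prefs x xs) ∧
        pvSelR pvLtW ((x :: xs).filter (fun q => pvPref prefs q == pvMaxP prefs x xs)) = some (n, w) := by
  intro xs
  induction xs with
  | nil =>
    intro x
    refine ⟨x.1, x.2, ?_, ?_⟩
    · simp [pvSelR, pvTri, pvMaxP]
    · simp [pvSelR, pvMaxP, List.filter]
  | cons y ys ih =>
    intro x
    obtain ⟨n', w', hA, hW⟩ := ih y
    have hM := pvMaxP_cons prefs x y ys
    set M' := pvMaxP prefs y ys with hM'def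
    set px := pvPref prefs x with hpx
    -- selA (x :: rest) unrolls on selA rest
    have hselA : pvSelR pvLtA ((x :: y :: ys).map (pvTri prefs)) =
        some (if pvLtA (n', w', M') (pvTri prefs x) then (n', w', M') else pvTri prefs x) := by
      simp only [List.map_cons] at hA ⊢
      rw [pvSelR_cons, hA]
    by_cases hgt : px < M'
    · -- rest's champion strictly wins on pref
      have hMx : pvMaxP prefs x (y :: ys) = M' := by rw [hM]; omega
      refine ⟨n', w', ?_, ?_⟩
      · rw [hselA, hMx]
        have : pvLtA (n', w', M') (pvTri prefs x) = true := by
          simp [pvLtA, pvTri, ← hpx]; omega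
        simp [this]
      · rw [hMx, List.filter_cons]
        have : (pvPref prefs x == M') = false := by simp [← hpx]; omega
        simp only [this, Bool.false_eq_true, if_neg, not_false_iff]
        simpa using hW
    · by_cases heq : px = M'
      · -- tie on pref: wait decides, first wins on wait ties
        have hMx : pvMaxP prefs x (y :: ys) = M' := by rw [hM]; omega
        by_cases hw : w' < x.2
        · refine ⟨n', w', ?_, ?_⟩
          · rw [hselA, hMx]
            have : pvLtA (n', w', M') (pvTri prefs x) = true := by
              simp [pvLtA, pvTri, ← hpx]; omega
            simp [this]
          · rw [hMx, List.filter_cons]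
            have hpxM : (pvPref prefs x == M') = true := by simp [← hpx, heq]
            simp only [hpxM, if_pos]
            simp only [pvSelR, hW]
            have : pvLtW (n', w') x = true := by simp [pvLtW]; omega
            simp [this]
        · refine ⟨x.1, x.2, ?_, ?_⟩
          · rw [hselA, hMx]
            have : pvLtA (n', w', M') (pvTri prefs x) = false := by
              simp [pvLtA, pvTri, ← hpx]; omega
            rw [if_neg (by rw [this]; exact Bool.false_ne_true)]
            simp [pvTri, ← hpx, heq]
          · rw [hMx, List.filter_cons]
            have hpxM : (pvPref prefs x == M') = true := by simp [← hpx, heq]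
            simp only [hpxM, if_pos]
            simp only [pvSelR, hW]
            have : pvLtW (n', w') x = false := by simp [pvLtW]; omega
            simp [this]
      · -- x strictly wins on pref: filter keeps only x
        have hlt : M' < px := by omega
        have hMx : pvMaxP prefs x (y :: ys) = px := by rw [hM]; omega
        refine ⟨x.1, x.2, ?_, ?_⟩
        · rw [hselA, hMx]
          have : pvLtA (n', w', M') (pvTri prefs x) = false := by
            simp [pvLtA, pvTri, ← hpx]; omega
          rw [if_neg (by rw [this]; exact Bool.false_ne_true)]
          simp [pvTri, ← hpx]
        · rw [hMx, List.filter_cons]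
          have hpxM : (pvPref prefs x == px) = true := by simp [← hpx]
          have hnil : (y :: ys).filter (fun q => pvPref prefs q == px) = [] := by
            rw [List.filter_eq_nil_iff]
            intro q hq
            have := pvMaxP_isMax prefs y ys q hq
            simp only [beq_iff_eq]
            omega
          simp [hpxM, hnil, pvSelR]

-- ===== VERDICT (by name: the statement is the Claim_ definition above) =====
theorem pick_best_ride_spec : Claim_equal_pick_best_ride := by
  intro rides prefs _
  unfold Spec_pick_best_ride pick_best_ride pick_best_ride_alt
  cases rides with
  | nil => rfl
  | cons r rs =>
    -- A side: reduce the sorted list's head to pvSelR pvLtA of the mapped triples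
    rw [pvCombined_eq_map prefs (r :: rs) []]
    simp only [List.nil_append]
    have hsorted :
        PySem.List.sorted2 ((r :: rs).map (fun p => (p.1, p.2, PySem.Dict.getD (PySem.Dict.mk prefs) p.1 0)))
          (fun x => -x.2.2) (fun x => x.2.1) =
        List.foldl (fun acc x => PySem.List.insertBy pvLtA x acc) []
          ((r :: rs).map (fun p => (p.1, p.2, PySem.Dict.getD (PySem.Dict.mk prefs) p.1 0))) := by
      rfl
    have hhead := pvHead_foldl_insertBy pvLtA
      ((r :: rs).map (fun p => (p.1, p.2, PySem.Dict.getD (PySem.Dict.mk prefs) p.1 0))) []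
    rw [pvFoldl_step_eq_selR pvLtA pvLtA_assoc] at hhead
    simp only [List.head?_nil] at hhead
    -- B side
    obtain ⟨n, w, hA, hW⟩ := pvMain prefs rs r
    have hmapeq : (r :: rs).map (fun p => (p.1, p.2, PySem.Dict.getD (PySem.Dict.mk prefs) p.1 0)) =
        (r :: rs).map (pvTri prefs) := by simp [pvTri, pvPref]
    rw [hmapeq] at hhead
    rw [hmapeq]
    rw [hA] at hhead
    -- hhead : head of the sorted list is some (n, w, maxP)
    have hBsel := pvBfold_eq_filter prefs (pvMaxP prefs r rs) (r :: rs) none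
    rw [pvFoldl_step_eq_selR pvLtW pvLtW_assoc] at hBsel
    have hfilt : ((r :: rs).filter (fun q => PySem.Dict.getD (PySem.Dict.mk prefs) q.1 0 == pvMaxP prefs r rs)) =
        ((r :: rs).filter (fun q => pvPref prefs q == pvMaxP prefs r rs)) := by
      simp [pvPref]
    rw [hfilt, hW] at hBsel
    simp only [Option.map_none] at hBsel
    -- assemble
    rw [hmapeq] at hsorted
    have hkey : (PySem.List.sorted2 ((r :: rs).map (pvTri prefs))
        (fun x => -x.2.2) (fun x => x.2.1)).head? = some (n, w, pvMaxP prefs r rs) := by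
      rw [hsorted]; exact hhead
    cases hs : PySem.List.sorted2 ((r :: rs).map (pvTri prefs)) (fun x => -x.2.2) (fun x => x.2.1) with
    | nil => rw [hs] at hkey; simp at hkey
    | cons hd tl =>
      rw [hs] at hkey
      simp only [List.head?_cons, Option.some.injEq] at hkey
      subst hkey
      rw [show (List.foldl max (PySem.Dict.getD (PySem.Dict.mk prefs) r.1 0)
            (rs.map fun q => PySem.Dict.getD (PySem.Dict.mk prefs) q.1 0)) = pvMaxP prefs r rs
          from rfl]
      rw [hBsel]
      try rfl
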